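-- pv_equiv track=rewrite | github.com/yukikitayama/leetcode-python | youtube/yt_2645_minimum_additions_to_make_valid_string.py | addMinimum1
-- ===== SOURCE A (Python) =====
-- def addMinimum1(word: str) -> int:
--
--     conversion = {
--         "a": "b",
--         "b": "c",
--         "c": "a"
--     }
--
--     ans = 0
--
--     should_see = "a"
--
--     for i in range(len(word)):
--
--         if word[i] == should_see:
--             should_see = conversion[word[i]]
--             continue
--
--         if should_see == "a":
--             if word[i] == "b":
--                 ans += 1
--             elif word[i] == "c":
--                 ans += 2
--
--         elif should_see == "b":
--             if word[i] == "c":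
--                 ans += 1
--             elif word[i] == "a":
--                 ans += 2
--
--         elif should_see == "c":
--             if word[i] == "a":
--                 ans += 1
--             elif word[i] == "b":
--                 ans += 2
--
--         should_see = conversion[word[i]]
--
--     # Pos process
--     if word[-1] == "a":
--         ans += 2
--     elif word[-1] == "b":
--         ans += 1
--
--     return ans
-- ===== SOURCE B (Python) =====
-- def addMinimum1(word: str) -> int:
--     # Count the maximal runs of strictly increasing positions: each such run
--     # fits into one "abc" block, so the answer is 3 * groups - len(word).
--     pos = {"a": 0, "b": 1, "c": 2}
--     groups = 1
--     for prev, cur in zip(word, word[1:]):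
--         if pos[cur] <= pos[prev]:
--             groups += 1
--     return 3 * groups - len(word)
-- ===== Notes on version B (the rewrite author's own statement) =====
-- stated objective: simpler
-- what changed: Instead of A's should_see state machine that accumulates per-character insertion costs plus a last-character fixup, B counts the number of maximal strictly-increasing runs (groups, one per needed 'abc' block) and returns the closed form 3 * groups - len(word).
import Mathlib
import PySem

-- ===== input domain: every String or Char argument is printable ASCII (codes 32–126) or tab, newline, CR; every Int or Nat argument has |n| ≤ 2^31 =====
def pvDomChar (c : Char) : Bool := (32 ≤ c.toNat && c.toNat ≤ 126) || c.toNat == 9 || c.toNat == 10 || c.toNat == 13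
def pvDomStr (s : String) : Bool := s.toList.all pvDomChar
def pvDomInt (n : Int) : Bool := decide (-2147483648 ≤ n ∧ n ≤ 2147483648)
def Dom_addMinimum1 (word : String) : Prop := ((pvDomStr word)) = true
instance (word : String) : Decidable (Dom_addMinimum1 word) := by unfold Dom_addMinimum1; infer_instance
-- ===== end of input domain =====

-- B drops A's should_see state machine and last-character fixup: it counts maximal
-- strictly-increasing runs (groups) and returns 3 * groups - len(word); objective: simpler.

-- ===== PORT A =====
def addMinimum1Conv : PySem.Dict Char Char :=
  ((PySem.Dict.empty.insert 'a' 'b').insert 'b' 'c').insert 'c' 'a'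

-- the for-loop of A as structural recursion over the characters; state = (ans, should_see).
-- conversion[word[i]]: get? = none is Python's KeyError (character other than a/b/c), excluded by Pre_;
-- the .getD fallback is never reached under Pre_.
def addMinimum1Loop : List Char → Int → Char → Int
  | [], ans, _ => ans
  | c :: cs, ans, see =>
    if c == see then addMinimum1Loop cs ans ((addMinimum1Conv.get? c).getD c)
    else
      let ans :=
        if see == 'a' then (if c == 'b' then ans + 1 else if c == 'c' then ans + 2 else ans)
        else if see == 'b' then (if c == 'c' then ans + 1 else if c == 'a' then ans + 2 else ans)
        else if see == 'c' then (if c == 'a' then ans + 1 else if c == 'b' then ans + 2 else ans)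
        else ans
      addMinimum1Loop cs ans ((addMinimum1Conv.get? c).getD c)

def addMinimum1 (word : String) : Int :=
  let ans := addMinimum1Loop word.toList 0 'a'
  -- word[-1]: none = IndexError on the empty string, excluded by Pre_
  match PySem.Str.pyGet? word (-1) with
  | none => ans
  | some last => if last == 'a' then ans + 2 else if last == 'b' then ans + 1 else ans

-- ===== PORT B =====
def addMinimum1Pos : PySem.Dict Char Int :=
  ((PySem.Dict.empty.insert 'a' 0).insert 'b' 1).insert 'c' 2

def addMinimum1_alt (word : String) : Int :=
  -- pos[c]: get? = none is Python's KeyError (character other than a/b/c), excluded by Pre_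
  let groups := (word.toList.zip (PySem.List.slice word.toList (some 1) none)).foldl
    (fun g p => if (addMinimum1Pos.get? p.2).getD 0 ≤ (addMinimum1Pos.get? p.1).getD 0
                then g + 1 else g) 1
  3 * groups - PySem.Str.len word

-- ===== PRECONDITION & SPEC =====
-- Pre_ excludes exactly where Python A raises: the empty string (IndexError on word[-1])
-- and strings containing a character other than a/b/c (KeyError in conversion[word[i]]).
def Pre_addMinimum1 (word : String) : Prop :=
  word.toList ≠ [] ∧ (word.toList.all (fun c => c == 'a' || c == 'b' || c == 'c')) = true
instance (word : String) : Decidable (Pre_addMinimum1 word) := by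
  unfold Pre_addMinimum1; infer_instance

def pvWitness_addMinimum1 : String := "acb"

def Spec_addMinimum1 (word : String) (out : Int) : Prop := out = addMinimum1_alt word
instance (word : String) (out : Int) : Decidable (Spec_addMinimum1 word out) := by
  unfold Spec_addMinimum1; infer_instance

-- ===== CLAIM (what is proved, stated in full; the proofs are below) =====
def Claim_equal_addMinimum1 : Prop :=
  ∀ (word : String), Dom_addMinimum1 word → Pre_addMinimum1 word →
    Spec_addMinimum1 word (addMinimum1 word)

-- ===== LEMMAS AND PROOFS =====

def pvPos (c : Char) : Int := (addMinimum1Pos.get? c).getD 0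

-- number of non-increasing adjacent steps along a chain of positions
def pvBreaks : Int → List Int → Int
  | _, [] => 0
  | p, q :: qs => (if q ≤ p then 1 else 0) + pvBreaks q qs

-- B's fold over the zipped character pairs counts the breaks of the position chain
lemma pvZipFoldC : ∀ (rest : List Char) (c0 : Char) (acc : Int),
    ((c0 :: rest).zip rest).foldl
        (fun g p => if (addMinimum1Pos.get? p.2).getD 0 ≤ (addMinimum1Pos.get? p.1).getD 0
                    then g + 1 else g) acc
      = acc + pvBreaks (pvPos c0) (rest.map pvPos) := by
  intro rest
  induction rest with
  | nil => intro c0 acc; simp [pvBreaks]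
  | cons d ds ih =>
      intro c0 acc
      simp only [List.zip_cons_cons, List.foldl_cons, List.map_cons, pvBreaks]
      rw [ih d]
      simp only [show (addMinimum1Pos.get? d).getD 0 = pvPos d from rfl,
        show (addMinimum1Pos.get? c0).getD 0 = pvPos c0 from rfl]
      by_cases h : pvPos d ≤ pvPos c0 <;> simp [h] <;> ring

-- one step of A's state machine: cost = (next - cur - 1) + 3·[next ≤ cur]
lemma pvStep (c d : Char) (hc : c = 'a' ∨ c = 'b' ∨ c = 'c')
    (hd : d = 'a' ∨ d = 'b' ∨ d = 'c') (rest : List Char) (ans : Int) :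
    addMinimum1Loop (d :: rest) ans ((addMinimum1Conv.get? c).getD c)
      = addMinimum1Loop rest
          (ans + (pvPos d - pvPos c - 1) + (if pvPos d ≤ pvPos c then 3 else 0))
          ((addMinimum1Conv.get? d).getD d) := by
  rcases hc with rfl | rfl | rfl <;> rcases hd with rfl | rfl | rfl <;>
    simp [addMinimum1Loop, pvPos,
      show (addMinimum1Conv.get? 'a').getD 'a' = 'b' from by decide,
      show (addMinimum1Conv.get? 'b').getD 'b' = 'c' from by decide,
      show (addMinimum1Conv.get? 'c').getD 'c' = 'a' from by decide,
      show (addMinimum1Pos.get? 'a').getD 0 = 0 from by decide,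
      show (addMinimum1Pos.get? 'b').getD 0 = 1 from by decide,
      show (addMinimum1Pos.get? 'c').getD 0 = 2 from by decide] <;>
    first
      | rfl
      | (congr 1; ring)

-- A's loop telescopes to: last − start − length + 3·breaks
lemma pvLoopBreaks : ∀ (cs : List Char), (∀ x ∈ cs, x = 'a' ∨ x = 'b' ∨ x = 'c') →
    ∀ (c : Char), (c = 'a' ∨ c = 'b' ∨ c = 'c') → ∀ (ans : Int),
    addMinimum1Loop cs ans ((addMinimum1Conv.get? c).getD c)
      = ans + ((cs.map pvPos).getLastD (pvPos c) - pvPos c) - cs.length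
          + 3 * pvBreaks (pvPos c) (cs.map pvPos) := by
  intro cs
  induction cs with
  | nil => intro _ c _ ans; simp [addMinimum1Loop, pvBreaks]
  | cons d rest ih =>
      intro h c hc ans
      have hd : d = 'a' ∨ d = 'b' ∨ d = 'c' := h d (List.mem_cons_self ..)
      have hrest : ∀ x ∈ rest, x = 'a' ∨ x = 'b' ∨ x = 'c' :=
        fun x hx => h x (List.mem_cons_of_mem _ hx)
      rw [pvStep c d hc hd rest ans, ih hrest d hd]
      simp only [List.map_cons, pvBreaks, List.getLastD_cons, List.length_cons]
      by_cases hle : pvPos d ≤ pvPos c <;> simp [hle] <;> ring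

-- ===== VERDICT (by name: the statement is the Claim_ definition above) =====
theorem addMinimum1_spec : Claim_equal_addMinimum1 := by
  intro word _ hpre
  obtain ⟨hne, hall⟩ := hpre
  have habc : ∀ c ∈ word.toList, c = 'a' ∨ c = 'b' ∨ c = 'c' := by
    intro c hc
    have := List.all_eq_true.mp hall c hc
    simpa [or_assoc] using this
  obtain ⟨c0, rest, hw⟩ := List.exists_cons_of_ne_nil hne
  have hc0 : c0 = 'a' ∨ c0 = 'b' ∨ c0 = 'c' := habc c0 (by rw [hw]; exact List.mem_cons_self ..)
  -- the last character
  obtain ⟨L, hL⟩ : ∃ L, (c0 :: rest).getLast? = some L :=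
    ⟨(c0 :: rest).getLast (by simp), List.getLast?_eq_some_getLast (by simp)⟩
  have hlast : L = 'a' ∨ L = 'b' ∨ L = 'c' :=
    habc L (by rw [hw]; exact List.mem_of_getLast? hL)
  have hget : PySem.Str.pyGet? word (-1) = some L := by
    rw [show PySem.Str.pyGet? word (-1) = PySem.List.pyGet? word.toList (-1) from rfl,
      PySem.List.pyGet?_neg_one, hw, hL]
  -- A's loop: should_see = 'a' = conversion['c']
  have hloop : addMinimum1Loop word.toList 0 'a'
      = 0 + ((word.toList.map pvPos).getLastD (pvPos 'c') - pvPos 'c') - word.toList.length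
          + 3 * pvBreaks (pvPos 'c') (word.toList.map pvPos) := by
    rw [show ('a' : Char) = (addMinimum1Conv.get? 'c').getD 'c' from by decide]
    exact pvLoopBreaks word.toList habc 'c' (by simp) 0
  have hmaplast : ((word.toList).map pvPos).getLastD (pvPos 'c') = pvPos L := by
    rw [hw, List.getLastD_eq_getLast?, List.getLast?_map, hL]; rfl
  -- the initial virtual step from 'c' is always a break (every position is ≤ 2)
  have hbreak : pvBreaks (pvPos 'c') (word.toList.map pvPos)
      = 1 + pvBreaks (pvPos c0) (rest.map pvPos) := by
    have hle : pvPos c0 ≤ pvPos 'c' := by rcases hc0 with rfl | rfl | rfl <;> decide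
    rw [hw]; simp [pvBreaks, hle]
  have hA : addMinimum1 word
      = 3 * (1 + pvBreaks (pvPos c0) (rest.map pvPos)) - ((rest.length : Int) + 1) := by
    unfold addMinimum1
    rw [hget]
    simp only []
    rw [hloop, hmaplast, hbreak, show word.toList.length = rest.length + 1 from by rw [hw]; rfl]
    rcases hlast with rfl | rfl | rfl <;>
      simp [show pvPos 'a' = 0 from by decide, show pvPos 'b' = 1 from by decide,
        show pvPos 'c' = 2 from by decide] <;> ring
  have hB : addMinimum1_alt word
      = 3 * (1 + pvBreaks (pvPos c0) (rest.map pvPos)) - ((rest.length : Int) + 1) := by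
    unfold addMinimum1_alt
    rw [show word.toList = c0 :: rest from hw]
    simp only [PySem.List.slice_from_one, List.tail_cons]
    rw [pvZipFoldC]
    have hl : PySem.Str.len word = ((rest.length : Int) + 1) := by
      rw [PySem.Str.len_eq, hw]; simp
    rw [hl]
  unfold Spec_addMinimum1
  rw [hA, hB]
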